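-- pv_equiv track=rewrite | github.com/veromarti/Galactic-Library-Keeper | visitors.py | visitors_species
-- ===== SOURCE A (Python) =====
-- def visitors_species(visitors):
--     cont_other = 0
--     cont_human = 0
--     cont_android = 0
--     species = []
--
--     for item in visitors:
--         if item["species"].lower() == 'other':
--             cont_other += 1
--         elif item["species"].lower() == 'human':
--             cont_human += 1
--         elif item["species"].lower() == 'android':
--             cont_android += 1
--     species.append({"Human":cont_human})
--     species.append({"Android":cont_android})
--     species.append({"Other":cont_other})
--
--     return(species)
-- ===== SOURCE B (Python) =====
-- def visitors_species(visitors):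
--     # staged passes: project once, then one independent count pass per category
--     species = [item["species"].lower() for item in visitors]
--     return [{label: species.count(key)}
--             for label, key in (("Human", "human"),
--                                ("Android", "android"),
--                                ("Other", "other"))]
-- ===== Notes on version B (the rewrite author's own statement) =====
-- stated objective: idiomatic
-- what changed: B keeps no running counters: it projects the lowered species once and then performs three independent list.count passes, building the result by comprehension over a (label, key) table, instead of A's single pass updating three named accumulators in an if/elif chain.
import Mathlib
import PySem

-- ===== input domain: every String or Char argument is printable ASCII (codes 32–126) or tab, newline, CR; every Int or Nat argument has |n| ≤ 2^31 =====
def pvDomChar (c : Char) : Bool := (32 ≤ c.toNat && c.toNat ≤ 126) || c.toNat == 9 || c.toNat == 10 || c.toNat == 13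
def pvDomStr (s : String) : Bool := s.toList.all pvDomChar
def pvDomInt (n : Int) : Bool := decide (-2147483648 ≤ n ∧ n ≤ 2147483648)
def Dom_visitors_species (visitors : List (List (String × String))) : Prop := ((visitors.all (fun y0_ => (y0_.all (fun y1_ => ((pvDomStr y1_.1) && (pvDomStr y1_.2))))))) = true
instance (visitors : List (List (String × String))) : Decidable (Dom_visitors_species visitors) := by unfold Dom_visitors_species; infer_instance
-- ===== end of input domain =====

-- B replaces A's single if/elif accumulator pass by a projection plus three independent count passes driven by a (label, key) table (idiomatic rewrite, same cost).
-- Pre_: every visitor dict must contain the key "species" (otherwise the Python raises KeyError).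


-- ===== PORT A =====
-- item["species"].lower(); Pre_ guarantees the key is present, so getD's default is never read
def pvSpeciesA (item : List (String × String)) : String :=
  PySem.Str.lower ((PySem.Dict.mk item).getD "species" "")

def visitors_species (visitors : List (List (String × String))) : List (List (String × Int)) :=
  let st := visitors.foldl (fun (c : Int × Int × Int) item =>
    if pvSpeciesA item = "other" then (c.1 + 1, c.2.1, c.2.2)
    else if pvSpeciesA item = "human" then (c.1, c.2.1 + 1, c.2.2)
    else if pvSpeciesA item = "android" then (c.1, c.2.1, c.2.2 + 1)
    else c) (0, 0, 0)
  [[("Human", st.2.1)], [("Android", st.2.2)], [("Other", st.1)]]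

-- ===== PORT B =====
def visitors_species_alt (visitors : List (List (String × String))) : List (List (String × Int)) :=
  let species := visitors.map (fun item => PySem.Str.lower ((PySem.Dict.mk item).getD "species" ""))
  [("Human", "human"), ("Android", "android"), ("Other", "other")].map
    (fun lk => [(lk.1, PySem.List.count species lk.2)])

-- ===== PRECONDITION & SPEC =====
def Pre_visitors_species (visitors : List (List (String × String))) : Prop :=
  ∀ item ∈ visitors, (PySem.Dict.mk item).contains "species" = true
instance (visitors : List (List (String × String))) : Decidable (Pre_visitors_species visitors) := by unfold Pre_visitors_species; infer_instance

def pvWitness_visitors_species : (List (List (String × String))) := [[("species", "Human")], [("species", "other")]]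

def Spec_visitors_species (visitors : List (List (String × String))) (out : List (List (String × Int))) : Prop := out = visitors_species_alt visitors
instance (visitors : List (List (String × String))) (out : List (List (String × Int))) : Decidable (Spec_visitors_species visitors out) := by unfold Spec_visitors_species; infer_instance

-- ===== CLAIM (what is proved, stated in full; the proofs are below) =====
def Claim_equal_visitors_species : Prop := ∀ (visitors : List (List (String × String))), Dom_visitors_species visitors → Pre_visitors_species visitors → Spec_visitors_species visitors (visitors_species visitors)

-- ===== LEMMAS AND PROOFS =====

-- A's fold of the if/elif chain counts each of the three lowered-species values
theorem pvFoldA_eq (vs : List (List (String × String))) : ∀ (a b c : Int),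
    vs.foldl (fun (c : Int × Int × Int) item =>
      if pvSpeciesA item = "other" then (c.1 + 1, c.2.1, c.2.2)
      else if pvSpeciesA item = "human" then (c.1, c.2.1 + 1, c.2.2)
      else if pvSpeciesA item = "android" then (c.1, c.2.1, c.2.2 + 1)
      else c) (a, b, c)
    = (a + ((vs.map pvSpeciesA).count "other" : Int),
       b + ((vs.map pvSpeciesA).count "human" : Int),
       c + ((vs.map pvSpeciesA).count "android" : Int)) := by
  induction vs with
  | nil => simp
  | cons v vs ih =>
    intro a b c
    simp only [List.foldl_cons, List.map_cons]
    by_cases h1 : pvSpeciesA v = "other"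
    · simp [h1, ih]; omega
    · by_cases h2 : pvSpeciesA v = "human"
      · simp [h2, ih]; omega
      · by_cases h3 : pvSpeciesA v = "android"
        · simp [h3, ih]; omega
        · simp [h1, h2, h3, ih]

-- ===== VERDICT (by name: the statement is the Claim_ definition above) =====
theorem visitors_species_spec : Claim_equal_visitors_species := by
  intro vs _ _
  unfold Spec_visitors_species visitors_species visitors_species_alt
  rw [pvFoldA_eq]
  unfold pvSpeciesA
  simp [PySem.List.count_eq, List.map]
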